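-- pv_equiv track=rewrite | github.com/mrshu/brutal-plugins | travel.py | rootify
-- ===== SOURCE A (Python) =====
-- def rootify(word):
--     """Return probable root of the word."""
--
--     if len(word) <= 5:
--         return word
--
--     w = word[::-1]
--     vowels = ['a', 'e', 'i', 'o', 'u', 'y']
--     for x in range(len(word)):
--         if w[x] in vowels and x != 0:
--             return word[:-(x + 1)]
-- ===== SOURCE B (Python) =====
-- def rootify(word):
--     """Return probable root of the word."""
--
--     if len(word) <= 5:
--         return word
--
--     vowels = set('aeiouy')
--     last = -1
--     for i in range(len(word) - 1):
--         if word[i] in vowels: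
--             last = i
--     if last >= 0:
--         return word[:last]
--     return None
-- ===== Notes on version B (the rewrite author's own statement) =====
-- stated objective: alternative
-- what changed: Replaces the reversed-copy backward scan with early return by a single forward pass that tracks the rightmost vowel index among all but the last character, slicing once at the end (no reversed copy, no negative-index slice).
-- outside the precondition, e.g. on rootify('bcdfgh'): A returns None, B returns None
import Mathlib
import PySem

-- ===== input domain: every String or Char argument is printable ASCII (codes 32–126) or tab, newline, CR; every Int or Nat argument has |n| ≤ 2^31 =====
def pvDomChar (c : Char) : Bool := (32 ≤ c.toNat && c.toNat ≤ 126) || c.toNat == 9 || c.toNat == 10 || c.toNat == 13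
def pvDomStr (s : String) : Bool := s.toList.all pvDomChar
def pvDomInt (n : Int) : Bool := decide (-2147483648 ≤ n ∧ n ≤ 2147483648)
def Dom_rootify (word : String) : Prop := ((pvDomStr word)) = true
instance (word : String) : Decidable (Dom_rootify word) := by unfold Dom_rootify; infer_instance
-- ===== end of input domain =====

-- B replaces A's reversed-copy backward early-return scan by one forward pass tracking the
-- rightmost vowel index (objective: alternative decomposition, same cost).

-- ===== PORT A =====
def rootifyVowels : List Char := ['a', 'e', 'i', 'o', 'u', 'y']

-- the 'for x in range(len(word))' loop with its early return; 'none' = the loop fell through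
-- (Python returns None there; excluded by Pre_rootify)
def rootifyLoopA (cs w : List Char) (x : Nat) : Option (List Char) :=
  if h : x < cs.length then
    if w.getD x ' ' ∈ rootifyVowels ∧ x ≠ 0 then
      -- word[:-(x+1)]: here 0 < x+1 ≤ len, so the negative slice is exactly take (len-(x+1))
      some (cs.take (cs.length - (x + 1)))
    else rootifyLoopA cs w (x + 1)
  else none
termination_by cs.length - x

def rootify (word : String) : String :=
  if word.toList.length ≤ 5 then word
  else
    -- w = word[::-1]
    match rootifyLoopA word.toList word.toList.reverse 0 with
    | some l => String.mk l
    | none => ""   -- Python A returns None here (not a str); outside Pre_rootify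

-- ===== PORT B =====
def rootify_alt (word : String) : String :=
  let cs := word.toList
  if cs.length ≤ 5 then word
  else
    let last : Int := (List.range (cs.length - 1)).foldl
      (fun acc i => if cs.getD i ' ' ∈ rootifyVowels then (i : Int) else acc) (-1)
    if 0 ≤ last then String.mk (cs.take last.toNat)
    else ""   -- Python B returns None here (not a str); outside Pre_rootify

-- ===== PRECONDITION & SPEC =====
-- Pre_ excludes exactly the inputs on which Python A returns None instead of a str
-- (length > 5 and no vowel among all but the last character); B returns None there too.
def Pre_rootify (word : String) : Prop :=
  word.toList.length ≤ 5 ∨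
    word.toList.dropLast.any (fun c => c ∈ (['a', 'e', 'i', 'o', 'u', 'y'] : List Char)) = true
instance (word : String) : Decidable (Pre_rootify word) := by unfold Pre_rootify; infer_instance

def pvWitness_rootify : String := "travels"

def Spec_rootify (word : String) (out : String) : Prop := out = rootify_alt word
instance (word : String) (out : String) : Decidable (Spec_rootify word out) := by unfold Spec_rootify; infer_instance

-- ===== CLAIM (what is proved, stated in full; the proofs are below) =====
def Claim_equal_rootify : Prop := ∀ (word : String), Dom_rootify word → Pre_rootify word → Spec_rootify word (rootify word)

-- ===== LEMMAS AND PROOFS =====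

-- rightmost vowel index of a list (characterization both ports are reduced to)
def idxR : List Char → Option Nat
  | [] => none
  | c :: t =>
    match idxR t with
    | some j => some (j + 1)
    | none => if c ∈ rootifyVowels then some 0 else none

theorem take_succ_getElem (l : List Char) (k : Nat) (h : k < l.length) :
    l.take (k + 1) = l.take k ++ [l[k]] := by
  rw [List.take_succ, List.getElem?_eq_getElem h]
  rfl

theorem idxR_append_singleton (l : List Char) (c : Char) :
    idxR (l ++ [c]) = if c ∈ rootifyVowels then some l.length else idxR l := by
  induction l with
  | nil => simp [idxR]
  | cons c' t ih =>
    simp only [List.cons_append, idxR, ih]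
    split_ifs with h <;> first | simp | rfl

theorem idxR_none_iff (l : List Char) :
    idxR l = none ↔ l.any (fun c => c ∈ rootifyVowels) = false := by
  induction l with
  | nil => simp [idxR]
  | cons c t ih =>
    simp only [idxR, List.any_cons]
    cases h : idxR t with
    | some j =>
      simp [h] at ih ⊢
      simp [ih]
    | none =>
      have hany := ih.mp h
      split_ifs with hc <;> simp [hc] <;> simpa using hany

theorem loopA_eq (cs : List Char) (m x : Nat) (hx1 : 1 ≤ x) (hm : x + m = cs.length) :
    rootifyLoopA cs cs.reverse x = (idxR (cs.take m)).map (fun j => cs.take j) := by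
  induction m generalizing x with
  | zero =>
    rw [rootifyLoopA]
    have hnx : ¬ x < cs.length := by omega
    simp [hnx, idxR]
  | succ k ih =>
    have hxlt : x < cs.length := by omega
    rw [rootifyLoopA, dif_pos hxlt]
    have hidx : k < cs.length := by omega
    have hwx : (cs.reverse).getD x ' ' = cs[k]'hidx := by
      rw [List.getD_eq_getElem _ (' ') (by simpa using hxlt), List.getElem_reverse]
      congr 1
      omega
    rw [take_succ_getElem cs k hidx, idxR_append_singleton]
    have hlen : (cs.take k).length = k := by rw [List.length_take]; omega
    by_cases hv : cs[k]'hidx ∈ rootifyVowels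
    · rw [if_pos hv, if_pos ⟨by rw [hwx]; exact hv, by omega⟩]
      have hk2 : cs.length - (x + 1) = k := by omega
      rw [hk2, Option.map_some, hlen]
    · rw [if_neg hv, if_neg (by rw [hwx]; exact fun hh => hv hh.1)]
      exact ih (x + 1) (by omega) (by omega)

theorem loopA_zero (cs w : List Char) (h : 0 < cs.length) :
    rootifyLoopA cs w 0 = rootifyLoopA cs w 1 := by
  rw [rootifyLoopA]
  simp [h]

theorem foldB_eq (cs : List Char) (m : Nat) (hm : m ≤ cs.length) :
    (List.range m).foldl
      (fun acc i => if cs.getD i ' ' ∈ rootifyVowels then (i : Int) else acc) (-1)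
      = match idxR (cs.take m) with | none => (-1 : Int) | some j => (j : Int) := by
  induction m with
  | zero => simp [idxR]
  | succ k ih =>
    rw [List.range_succ, List.foldl_append]
    rw [ih (by omega)]
    have hk : k < cs.length := by omega
    have hget : cs.getD k ' ' = cs[k] := List.getD_eq_getElem _ _ hk
    have hlen : (cs.take k).length = k := by rw [List.length_take]; omega
    rw [take_succ_getElem cs k hk, idxR_append_singleton]
    simp only [List.foldl_cons, List.foldl_nil, hget, hlen]
    split_ifs with hv
    · rfl
    · rfl

-- ===== VERDICT (by name: the statement is the Claim_ definition above) =====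
theorem rootify_spec : Claim_equal_rootify := by
  intro word _ hpre
  unfold Spec_rootify rootify rootify_alt
  set cs := word.toList with hcs
  by_cases h5 : cs.length ≤ 5
  · simp [h5]
  · simp only [h5, if_false]
    have hpos : 0 < cs.length := by omega
    have hvow : cs.dropLast.any (fun c => c ∈ rootifyVowels) = true := by
      rcases hpre with h | h
      · rw [← hcs] at h; omega
      · simpa [rootifyVowels] using h
    have hdrop : cs.dropLast = cs.take (cs.length - 1) := by
      rw [List.dropLast_eq_take]
    rw [loopA_zero cs cs.reverse hpos,
        loopA_eq cs (cs.length - 1) 1 le_rfl (by omega),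
        foldB_eq cs (cs.length - 1) (by omega)]
    rw [hdrop] at hvow
    cases hidx : idxR (cs.take (cs.length - 1)) with
    | none =>
      rw [idxR_none_iff] at hidx
      rw [hvow] at hidx
      exact absurd hidx (by simp)
    | some j =>
      simp only [Option.map_some]
      have : (0 : Int) ≤ (j : Int) := by positivity
      rw [if_pos this]
      simp
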